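-- pv_equiv track=rewrite | github.com/annieLognCoding/PythonTetrisClass | Lectures/dayTwoSkeleton.py | func7
-- ===== SOURCE A (Python) =====
-- def isMultipleOf4or7(x):
--     return ((x % 4) == 0) or ((x % 7) == 0)
--
-- def func7(n):
--     found = 0
--     guess = -1
--     #Why do we use while loop here?
--     while (found <= n):
--         guess += 1
--         if (isMultipleOf4or7(guess)):
--             found += 1
--     return guess
-- ===== SOURCE B (Python) =====
-- _OFFSETS = (0, 4, 7, 8, 12, 14, 16, 20, 21, 24)
--
-- def func7(n):
--     # there are exactly 10 multiples of 4 or 7 in every block of 28 integers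
--     q, r = divmod(n, 10)
--     return 28 * q + _OFFSETS[r]
-- ===== Notes on version B (the rewrite author's own statement) =====
-- stated objective: faster
-- what changed: Replaced the linear search that counts multiples of 4 or 7 one integer at a time with an O(1) closed form using the period-28 pattern of the 10 residues, via divmod(n, 10) and an offset table.
-- outside the precondition, e.g. on func7(-1): A returns -1, B returns -4
import Mathlib
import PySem

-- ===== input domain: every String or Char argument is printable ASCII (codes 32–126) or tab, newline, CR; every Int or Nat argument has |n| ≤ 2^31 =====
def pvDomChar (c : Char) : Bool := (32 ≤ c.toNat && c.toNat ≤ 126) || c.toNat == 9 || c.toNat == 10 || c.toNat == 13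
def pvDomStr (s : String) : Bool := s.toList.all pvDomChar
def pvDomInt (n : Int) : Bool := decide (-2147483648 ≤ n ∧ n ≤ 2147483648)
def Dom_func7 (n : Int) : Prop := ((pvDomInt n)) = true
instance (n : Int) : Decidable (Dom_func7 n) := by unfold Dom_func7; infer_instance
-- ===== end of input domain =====

-- B replaces A's one-by-one linear search with an O(1) closed form from the
-- period-28 pattern of the 10 residues that are multiples of 4 or 7 (objective: faster).

-- ===== PORT A =====
-- helper: isMultipleOf4or7(x)
def isMultipleOf4or7 (x : Int) : Bool :=
  (PySem.Int.mod x 4 == 0) || (PySem.Int.mod x 7 == 0)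

-- the while loop, fuel-guarded (fuel only makes the recursion total; with the
-- fuel chosen in func7 the loop always exits via its own condition)
def func7Loop (fuel : Nat) (n found guess : Int) : Int :=
  match fuel with
  | 0 => guess
  | Nat.succ f =>
    if found ≤ n then
      let guess' := guess + 1
      if isMultipleOf4or7 guess' then func7Loop f n (found + 1) guess'
      else func7Loop f n found guess'
    else guess

def func7 (n : Int) : Int := func7Loop (28 * (n.toNat + 1)) n 0 (-1)

-- ===== PORT B =====
def func7Offsets : List Int := [0, 4, 7, 8, 12, 14, 16, 20, 21, 24]

def func7_alt (n : Int) : Int :=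
  let q := PySem.Int.floordiv n 10
  let r := PySem.Int.mod n 10
  -- _OFFSETS[r]: r = n % 10 ∈ [0, 10), so the lookup always succeeds and the
  -- .getD 0 default is unreachable
  28 * q + (PySem.List.pyGet? func7Offsets r).getD 0

-- ===== PRECONDITION & SPEC =====
-- Pre_ excludes negative n: there A returns its initial sentinel -1 without searching,
-- while B's period-28 closed form extends the pattern downward (e.g. -4 at n = -1);
-- neither value is specified for a negative index into the sequence.
def Pre_func7 (n : Int) : Prop := 0 ≤ n
instance (n : Int) : Decidable (Pre_func7 n) := by unfold Pre_func7; infer_instance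
def pvWitness_func7 : Int := (3)

def Spec_func7 (n : Int) (out : Int) : Prop := out = func7_alt n
instance (n : Int) (out : Int) : Decidable (Spec_func7 n out) := by unfold Spec_func7; infer_instance

-- ===== CLAIM (what is proved, stated in full; the proofs are below) =====
def Claim_equal_func7 : Prop := ∀ (n : Int), Dom_func7 n → Pre_func7 n → Spec_func7 n (func7 n)

-- ===== LEMMAS AND PROOFS =====

-- number of multiples of 4 or 7 in [0, g] (for g ≥ -1), in closed form
def hitCnt (g : Int) : Int := g / 4 + g / 7 - g / 28 + 1

theorem isMult_iff (x : Int) : isMultipleOf4or7 x = true ↔ (x % 4 = 0 ∨ x % 7 = 0) := by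
  rw [isMultipleOf4or7, PySem.Int.mod_eq_emod_of_pos (by omega : (0:Int) < 4),
      PySem.Int.mod_eq_emod_of_pos (by omega : (0:Int) < 7)]
  simp

theorem hitCnt_succ (g : Int) :
    hitCnt (g + 1) = hitCnt g + (if isMultipleOf4or7 (g + 1) then 1 else 0) := by
  rw [hitCnt, hitCnt]
  have c3 := Int.emod_emod_of_dvd (g+1) (by norm_num : (4:Int) ∣ 28)
  have c4 := Int.emod_emod_of_dvd (g+1) (by norm_num : (7:Int) ∣ 28)
  have s4 : (g+1)/4 = g/4 + (if (g+1) % 4 = 0 then 1 else 0) := by split <;> omega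
  have s7 : (g+1)/7 = g/7 + (if (g+1) % 7 = 0 then 1 else 0) := by split <;> omega
  have s28 : (g+1)/28 = g/28 + (if (g+1) % 28 = 0 then 1 else 0) := by split <;> omega
  split
  · next h =>
      have h' := (isMult_iff _).mp h
      split at s4 <;> split at s7 <;> split at s28 <;> omega
  · next h =>
      have h' := (not_iff_not.mpr (isMult_iff (g + 1))).mp (by simpa using h)
      rw [not_or] at h'
      split at s4 <;> split at s7 <;> split at s28 <;> omega

theorem hitCnt_mono (g g' : Int) (h : g ≤ g') : hitCnt g ≤ hitCnt g' := by
  have key : ∀ k : Nat, hitCnt g ≤ hitCnt (g + k) := by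
    intro k
    induction k with
    | zero => simp
    | succ m ih =>
        have h2 := hitCnt_succ (g + m)
        have he : g + ((m + 1 : Nat) : Int) = (g + m) + 1 := by push_cast; ring
        rw [he]
        split at h2 <;> omega
  have : g' = g + ((g' - g).toNat : Int) := by omega
  rw [this]; exact key _

theorem hitCnt_strict (g g' : Int) (h : g < g') (hm : isMultipleOf4or7 g' = true) :
    hitCnt g < hitCnt g' := by
  have h1 : hitCnt g ≤ hitCnt (g' - 1) := hitCnt_mono _ _ (by omega)
  have h2 := hitCnt_succ (g' - 1)
  rw [show g' - 1 + 1 = g' by omega] at h2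
  simp only [hm, if_pos] at h2
  omega

-- closed-form value of B, and its two key properties
theorem alt_props (n : Int) (hn : 0 ≤ n) :
    isMultipleOf4or7 (func7_alt n) = true ∧ hitCnt (func7_alt n) = n + 1 ∧
    func7_alt n ≤ 28 * n + 24 ∧ 0 ≤ func7_alt n := by
  have h10 : (0:Int) < 10 := by omega
  have hq : PySem.Int.floordiv n 10 = n / 10 := PySem.Int.floordiv_eq_ediv_of_pos h10
  have hr : PySem.Int.mod n 10 = n % 10 := PySem.Int.mod_eq_emod_of_pos h10
  have hrlo : 0 ≤ n % 10 := Int.emod_nonneg n (by omega)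
  have hrhi : n % 10 < 10 := Int.emod_lt_of_pos n h10
  have hqn : 0 ≤ n / 10 := Int.ediv_nonneg hn (by omega)
  rw [func7_alt, hq, hr]
  set r := n % 10 with hrdef
  have c1 : ∀ x : Int, x % 28 % 4 = x % 4 := fun x =>
    Int.emod_emod_of_dvd x (by norm_num : (4:Int) ∣ 28)
  have c2 : ∀ x : Int, x % 28 % 7 = x % 7 := fun x =>
    Int.emod_emod_of_dvd x (by norm_num : (7:Int) ∣ 28)
  interval_cases r <;>
    · simp [func7Offsets, PySem.List.pyGet?, PySem.List.pyIdx?]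
      refine ⟨?_, ?_, by omega, by omega⟩
      · rw [isMult_iff]
        have := c1 (28 * (n / 10)); have := c2 (28 * (n / 10)); omega
      · rw [hitCnt]; omega

theorem loop_lemma (fuel : Nat) (n found guess : Int) (hn : 0 ≤ n)
    (hg : -1 ≤ guess) (hf : found = hitCnt guess) (hle : found ≤ n + 1)
    (hexit : found = n + 1 → isMultipleOf4or7 guess = true)
    (hfuel : func7_alt n - guess ≤ (fuel : Int)) :
    func7Loop fuel n found guess = func7_alt n := by
  induction fuel generalizing found guess with
  | zero =>
      simp only [func7Loop]
      obtain ⟨hm, hc, _, hpos⟩ := alt_props n hn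
      simp only [Nat.cast_zero] at hfuel
      -- guess ≥ func7_alt n
      have hge : func7_alt n ≤ guess := by omega
      have h1 : hitCnt (func7_alt n) ≤ hitCnt guess := hitCnt_mono _ _ hge
      have hfound : found = n + 1 := by omega
      by_contra hne
      have hlt : func7_alt n < guess := by omega
      have := hitCnt_strict (func7_alt n) guess hlt (hexit hfound)
      omega
  | succ f ih =>
      simp only [func7Loop]
      split
      · next hcond =>
          have hstep := hitCnt_succ guess
          by_cases hm : isMultipleOf4or7 (guess + 1) = true
          · rw [hm]
            rw [hm, if_pos rfl] at hstep
            exact ih (found + 1) (guess + 1) (by omega) (by omega) (by omega)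
              (fun _ => hm) (by push_cast at hfuel ⊢; omega)
          · rw [Bool.eq_false_iff.mpr hm]
            simp only [Bool.false_eq_true, if_false]
            rw [Bool.eq_false_iff.mpr hm] at hstep
            simp only [Bool.false_eq_true, if_false] at hstep
            exact ih found (guess + 1) (by omega) (by omega) (by omega)
              (by omega) (by push_cast at hfuel ⊢; omega)
      · next hcond =>
          obtain ⟨hm, hc, _, hpos⟩ := alt_props n hn
          have hfound : found = n + 1 := by omega
          have hmg := hexit hfound
          -- two multiples with the same count coincide
          by_contra hne
          rcases lt_or_gt_of_ne (fun h : guess = func7_alt n => hne (by rw [h])) with h | h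
          · have := hitCnt_strict guess (func7_alt n) h hm; omega
          · have := hitCnt_strict (func7_alt n) guess h hmg; omega

-- ===== VERDICT (by name: the statement is the Claim_ definition above) =====
theorem func7_spec : Claim_equal_func7 := by
  intro n _ hpre
  unfold Spec_func7 Pre_func7 at *
  rw [func7]
  refine loop_lemma _ n 0 (-1) hpre (by omega) ?_ (by omega) (by omega) ?_
  · rw [hitCnt]; norm_num
  · obtain ⟨_, _, hb, _⟩ := alt_props n hpre
    have : ((28 * (n.toNat + 1) : Nat) : Int) = 28 * (n + 1) := by
      push_cast; omega
    rw [this]; omega
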